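-- pv_equiv track=rewrite | github.com/crazyzlj/swatplus_utility | preprocess/subbasin_updown_relationships.py | find_all_upstream
-- ===== SOURCE A (Python) =====
-- from collections import deque
--
-- def find_all_upstream(start_subbasin, upstream_map):
--     """
--     Uses Breadth-First Search (BFS) to find all upstream subbasins
--     for a given starting subbasin.
--
--     Args:
--     start_subbasin: The ID of the starting subbasin.
--     upstream_map: A dictionary storing {subbasin: [immediate_upstream_subbasins]}
--
--     Returns:
--     A set containing all upstream subbasin IDs.
--     """
--     all_upstream = set()
--
--     # Check if the starting subbasin exists in the topology map
--     if start_subbasin not in upstream_map: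
--         return all_upstream
--
--     # Use a deque (double-ended queue) for efficient BFS
--     # The queue starts with the *immediate* upstream neighbors of the target subbasin
--     queue = deque(upstream_map[start_subbasin])
--
--     while queue:
--         # Get the next subbasin from the left side of the queue
--         current_sub = queue.popleft()
--
--         # If this subbasin hasn't been processed yet
--         if current_sub not in all_upstream:
--             # 1. Add it to the set of all upstream subbasins
--             all_upstream.add(current_sub)
--
--             # 2. Add its *immediate* upstream neighbors to the right side of the queue
--             #    for future processing.
--             #    Use .get(current_sub, []) to safely handle headwater subbasins
--             #    that have no upstream neighbors.
--             for up_sub in upstream_map.get(current_sub, []):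
--                 if up_sub not in all_upstream:
--                     queue.append(up_sub)
--
--     return all_upstream
-- ===== SOURCE B (Python) =====
-- def find_all_upstream(start_subbasin, upstream_map):
--     """Edge-relaxation fixpoint (Bellman-Ford style): repeatedly sweep the whole
--     topology map, adding the immediate upstream neighbours of every already-reached
--     subbasin, until a full sweep adds nothing.  No queue and no visitation order."""
--     if start_subbasin not in upstream_map:
--         return set()
--     reached = set(upstream_map[start_subbasin])
--     changed = True
--     while changed:
--         changed = False
--         for sub, ups in upstream_map.items():
--             if sub in reached:
--                 for u in ups:
--                     if u not in reached:
--                         reached.add(u)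
--                         changed = True
--     return reached
-- ===== Notes on version B (the rewrite author's own statement) =====
-- stated objective: alternative
-- what changed: A's queue-based BFS is replaced by a Bellman-Ford-style fixpoint: whole-map sweeps that add the upstream neighbours of already-reached subbasins until a sweep changes nothing (no queue, no visited-order bookkeeping); both compute the set of subbasins reachable upstream.
import Mathlib
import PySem

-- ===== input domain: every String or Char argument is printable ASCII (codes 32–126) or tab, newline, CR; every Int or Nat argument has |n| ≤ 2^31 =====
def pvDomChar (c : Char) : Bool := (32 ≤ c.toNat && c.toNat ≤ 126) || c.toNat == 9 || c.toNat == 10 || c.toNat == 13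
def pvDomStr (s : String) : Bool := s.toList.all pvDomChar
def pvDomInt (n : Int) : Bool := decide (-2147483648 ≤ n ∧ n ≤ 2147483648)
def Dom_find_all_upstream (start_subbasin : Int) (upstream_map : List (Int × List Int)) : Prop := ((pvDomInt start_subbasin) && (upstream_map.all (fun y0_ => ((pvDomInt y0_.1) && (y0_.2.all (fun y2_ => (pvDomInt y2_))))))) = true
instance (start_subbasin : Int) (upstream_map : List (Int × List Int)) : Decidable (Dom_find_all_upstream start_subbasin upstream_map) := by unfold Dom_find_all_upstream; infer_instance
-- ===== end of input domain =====

-- B replaces A's queue-based BFS by a Bellman-Ford-style fixpoint of whole-map sweeps (alternative algorithm,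
-- not faster); Python returns an unordered set, so both ports return its canonical ascending element list
-- (set outputs are compared as finite sets).

-- ===== PORT A =====
-- upstream_map.get(k, []) (first-match association-list lookup, like the Python dict)
def pvAdj (m : List (Int × List Int)) (k : Int) : List Int := (List.lookup k m).getD []

-- the 'while queue:' BFS loop; the Nat argument is only a totality guard (fuel), always sufficient at the call site
def pvBfs (m : List (Int × List Int)) : Nat → PySem.Set Int → List Int → PySem.Set Int
  | _, all_upstream, [] => all_upstream
  | 0, all_upstream, _ => all_upstream
  | fuel+1, all_upstream, current_sub :: queue =>
    if current_sub ∈ all_upstream then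
      pvBfs m fuel all_upstream queue
    else
      pvBfs m fuel (PySem.Set.add all_upstream current_sub)
        ((pvAdj m current_sub).foldl
          (fun q up_sub => if up_sub ∈ PySem.Set.add all_upstream current_sub then q else q ++ [up_sub])
          queue)

def find_all_upstream (start_subbasin : Int) (upstream_map : List (Int × List Int)) : List Int :=
  match List.lookup start_subbasin upstream_map with
  | none => PySem.Set.empty
  | some seeds =>
      PySem.List.sorted
        (pvBfs upstream_map (seeds.length + (upstream_map.map (fun p => p.2.length)).sum + 1)
          PySem.Set.empty seeds)
        (fun x => x) false

-- ===== PORT B =====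
-- one pair of the sweep: 'if sub in reached: for u in ups: if u not in reached: reached.add(u); changed = True'
def pvPassStep (st : PySem.Set Int × Bool) (p : Int × List Int) : PySem.Set Int × Bool :=
  if p.1 ∈ st.1 then
    p.2.foldl (fun st2 u => if u ∈ st2.1 then st2 else (PySem.Set.add st2.1 u, true)) st
  else st

-- one full 'for sub, ups in upstream_map.items():' sweep, starting with changed = False
def pvPass (m : List (Int × List Int)) (reached : PySem.Set Int) : PySem.Set Int × Bool :=
  m.foldl pvPassStep (reached, false)

-- the 'while changed:' loop; the Nat argument is only a totality guard (fuel), always sufficient at the call site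
def pvFix (m : List (Int × List Int)) : Nat → PySem.Set Int → PySem.Set Int
  | 0, reached => reached
  | fuel+1, reached =>
      let st := pvPass m reached
      if st.2 then pvFix m fuel st.1 else st.1

def find_all_upstream_alt (start_subbasin : Int) (upstream_map : List (Int × List Int)) : List Int :=
  match List.lookup start_subbasin upstream_map with
  | none => PySem.Set.empty
  | some seeds =>
      PySem.List.sorted
        (pvFix upstream_map (seeds.length + (upstream_map.map (fun p => p.2.length)).sum + 1)
          (PySem.Set.ofList seeds))
        (fun x => x) false

-- ===== PRECONDITION & SPEC =====
-- Pre_ excludes only association lists with duplicate keys, which cannot arise from a Python dict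
-- (the dict argument is encoded as a key-distinct association list).
def Pre_find_all_upstream (start_subbasin : Int) (upstream_map : List (Int × List Int)) : Prop :=
  (upstream_map.map Prod.fst).Nodup
instance (start_subbasin : Int) (upstream_map : List (Int × List Int)) : Decidable (Pre_find_all_upstream start_subbasin upstream_map) := by unfold Pre_find_all_upstream; infer_instance

def pvWitness_find_all_upstream : Int × (List (Int × List Int)) := (1, [(1, [2, 3]), (2, [3]), (3, [])])

def Spec_find_all_upstream (start_subbasin : Int) (upstream_map : List (Int × List Int)) (out : List Int) : Prop := out = find_all_upstream_alt start_subbasin upstream_map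
instance (start_subbasin : Int) (upstream_map : List (Int × List Int)) (out : List Int) : Decidable (Spec_find_all_upstream start_subbasin upstream_map out) := by unfold Spec_find_all_upstream; infer_instance

-- ===== CLAIM (what is proved, stated in full; the proofs are below) =====
def Claim_equal_find_all_upstream : Prop := ∀ (start_subbasin : Int) (upstream_map : List (Int × List Int)), Dom_find_all_upstream start_subbasin upstream_map → Pre_find_all_upstream start_subbasin upstream_map → Spec_find_all_upstream start_subbasin upstream_map (find_all_upstream start_subbasin upstream_map)

-- ===== LEMMAS AND PROOFS =====

-- reachability through the upstream relation from a seed list S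
inductive pvReach (m : List (Int × List Int)) (S : List Int) : Int → Prop where
  | base {x : Int} : x ∈ S → pvReach m S x
  | step {y x : Int} : pvReach m S y → x ∈ pvAdj m y → pvReach m S x

theorem pvReach_mono {m : List (Int × List Int)} {S S' : List Int} (h : ∀ s ∈ S, s ∈ S') {x : Int}
    (hx : pvReach m S x) : pvReach m S' x := by
  induction hx with
  | base hb => exact pvReach.base (h _ hb)
  | step _ hadj ih => exact pvReach.step ih hadj

theorem pvReach_bind {m : List (Int × List Int)} {S S' : List Int}
    (h : ∀ s ∈ S', pvReach m S s) {x : Int} (hx : pvReach m S' x) : pvReach m S x := by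
  induction hx with
  | base hb => exact h _ hb
  | step _ hadj ih => exact pvReach.step ih hadj

theorem pvReach_closed {m : List (Int × List Int)} {S r : List Int}
    (hS : ∀ s ∈ S, s ∈ r) (hcl : ∀ c ∈ r, ∀ u ∈ pvAdj m c, u ∈ r) {x : Int}
    (hx : pvReach m S x) : x ∈ r := by
  induction hx with
  | base hb => exact hS _ hb
  | step _ hadj ih => exact hcl _ ih _ hadj

-- remaining adjacency budget for A's loop: total adjacency length of distinct keys not yet visited
def pvBudget (m : List (Int × List Int)) (vis : List Int) : Nat :=
  (((PySem.List.dedup (m.map Prod.fst)).filter (fun k => decide (k ∉ vis))).map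
    (fun k => (pvAdj m k).length)).sum

-- the append-if fold of A (guard on a fixed visited set) is append-the-filtered-list
theorem pvFold_eq_filter (adj : List Int) (vis : List Int) : ∀ (q : List Int),
    adj.foldl (fun q up => if up ∈ vis then q else q ++ [up]) q
      = q ++ adj.filter (fun u => decide (u ∉ vis)) := by
  induction adj with
  | nil => intro q; simp
  | cons u rest ih =>
      intro q
      rw [List.foldl_cons]
      by_cases h : u ∈ vis
      · rw [if_pos h, List.filter_cons_of_neg (by simpa using h)]
        exact ih q
      · rw [if_neg h, List.filter_cons_of_pos (by simpa using h), ih (q ++ [u])]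
        simp [List.append_assoc]

-- removing one occurrence of c from a Nodup list splits the mapped sum
theorem pvSum_map_erase (g : Int → Nat) (c : Int) : ∀ (ks : List Int), ks.Nodup → c ∈ ks →
    (ks.map g).sum = g c + ((ks.filter (fun k => decide (k ≠ c))).map g).sum := by
  intro ks
  induction ks with
  | nil => intro _ h; simp at h
  | cons k rest ih =>
      intro hnd hmem
      rcases List.mem_cons.mp hmem with rfl | hmem'
      · have hrest : c ∉ rest := (List.nodup_cons.mp hnd).1
        have hf : rest.filter (fun k => decide (k ≠ c)) = rest :=
          List.filter_eq_self.mpr (fun a ha => by simp; rintro rfl; exact hrest ha)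
        rw [List.map_cons, List.sum_cons, List.filter_cons_of_neg (by simp), hf]
      · have hk : k ≠ c := by rintro rfl; exact (List.nodup_cons.mp hnd).1 hmem'
        rw [List.map_cons, List.sum_cons, ih (List.nodup_cons.mp hnd).2 hmem',
          List.filter_cons_of_pos (by simpa using hk)]
        simp only [List.map_cons, List.sum_cons]
        omega

theorem pvLookup_eq_none (a : Int) : ∀ (m : List (Int × List Int)), a ∉ m.map Prod.fst →
    List.lookup a m = none := by
  intro m
  induction m with
  | nil => intro _; rfl
  | cons p rest ih =>
      intro h
      simp only [List.map_cons, List.mem_cons] at h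
      rw [not_or] at h
      rw [show p = (p.1, p.2) from rfl, List.lookup_cons]
      have hb : (a == p.1) = false := by simpa using h.1
      simp [hb, ih h.2]

-- budget transfer: visiting a new node c frees exactly its adjacency length
theorem pvBudget_step (m : List (Int × List Int)) (vis : List Int) (c : Int) (hc : c ∉ vis) :
    pvBudget m vis = pvBudget m (vis ++ [c]) + (pvAdj m c).length := by
  unfold pvBudget
  set ks := PySem.List.dedup (m.map Prod.fst) with hks
  have hnd : ks.Nodup := PySem.List.nodup_dedup _
  have hfilter : ks.filter (fun k => decide (k ∉ vis ++ [c]))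
      = (ks.filter (fun k => decide (k ∉ vis))).filter (fun k => decide (k ≠ c)) := by
    rw [List.filter_filter]
    apply List.filter_congr
    intro x _
    simp [and_comm]
  by_cases hmem : c ∈ m.map Prod.fst
  · have hcks : c ∈ ks.filter (fun k => decide (k ∉ vis)) := by
      rw [List.mem_filter]
      exact ⟨(PySem.List.mem_dedup _ _).mpr hmem, by simpa using hc⟩
    rw [pvSum_map_erase (fun k => (pvAdj m k).length) c _ (List.Nodup.filter _ hnd) hcks,
      hfilter]
    omega
  · have hadj : pvAdj m c = [] := by
      unfold pvAdj; rw [pvLookup_eq_none c m hmem]; rfl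
    have : ks.filter (fun k => decide (k ∉ vis ++ [c])) = ks.filter (fun k => decide (k ∉ vis)) := by
      apply List.filter_congr
      intro x hx
      have : x ≠ c := by rintro rfl; exact hmem ((PySem.List.mem_dedup _ _).mp hx)
      simp [this]
    rw [this, hadj]
    simp

-- the initial budget is at most the total adjacency length
theorem pvSum_adj_le (m : List (Int × List Int)) : ∀ (ks : List Int), ks.Nodup →
    (ks.map (fun k => (pvAdj m k).length)).sum ≤ (m.map (fun p => p.2.length)).sum := by
  induction m with
  | nil =>
      intro ks _
      have : ∀ k, pvAdj ([] : List (Int × List Int)) k = [] := fun k => rfl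
      simp [this]
  | cons p rest ih =>
      intro ks hnd
      have hadj : ∀ k, pvAdj (p :: rest) k = if p.1 = k then p.2 else pvAdj rest k := by
        intro k
        unfold pvAdj
        rw [show p = (p.1, p.2) from rfl, List.lookup_cons]
        by_cases h : k = p.1
        · subst h; simp
        · have hb : (k == p.1) = false := by simpa using h
          simp [hb]
          exact fun hc => absurd hc.symm h
      by_cases hmem : p.1 ∈ ks
      · rw [pvSum_map_erase _ p.1 ks hnd hmem, hadj p.1, if_pos rfl]
        have hmapeq : (ks.filter (fun k => decide (k ≠ p.1))).map (fun k => (pvAdj (p :: rest) k).length)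
            = (ks.filter (fun k => decide (k ≠ p.1))).map (fun k => (pvAdj rest k).length) := by
          apply List.map_congr_left
          intro x hx
          have : x ≠ p.1 := by simpa using (List.mem_filter.mp hx).2
          rw [hadj x, if_neg (fun hc : p.1 = x => this hc.symm)]
        rw [hmapeq]
        have := ih (ks.filter (fun k => decide (k ≠ p.1))) (List.Nodup.filter _ hnd)
        simp only [List.map_cons, List.sum_cons]
        omega
      · have hmapeq : ks.map (fun k => (pvAdj (p :: rest) k).length)
            = ks.map (fun k => (pvAdj rest k).length) := by
          apply List.map_congr_left
          intro x hx
          have : x ≠ p.1 := by rintro rfl; exact hmem hx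
          rw [hadj x, if_neg (fun hc : p.1 = x => this hc.symm)]
        rw [hmapeq]
        have := ih ks hnd
        simp only [List.map_cons, List.sum_cons]
        omega

-- MAIN LEMMA for A: with sufficient fuel, the BFS result is Nodup, contains vis and q, is closed
-- under the adjacency map, and is sound for reachability from vis ++ q.
theorem pvBfs_main (m : List (Int × List Int)) : ∀ (fuel : Nat) (vis q : List Int),
    vis.Nodup →
    q.length + pvBudget m vis ≤ fuel →
    (∀ c ∈ vis, ∀ u ∈ pvAdj m c, u ∈ vis ∨ u ∈ q) →
    (pvBfs m fuel vis q).Nodup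
    ∧ (∀ x ∈ vis, x ∈ pvBfs m fuel vis q)
    ∧ (∀ x ∈ q, x ∈ pvBfs m fuel vis q)
    ∧ (∀ c ∈ pvBfs m fuel vis q, ∀ u ∈ pvAdj m c, u ∈ pvBfs m fuel vis q)
    ∧ (∀ x ∈ pvBfs m fuel vis q, pvReach m (vis ++ q) x) := by
  intro fuel
  induction fuel with
  | zero =>
      intro vis q hnd hA hInv
      have hq : q = [] := List.eq_nil_of_length_eq_zero (by omega)
      subst hq
      refine ⟨by simpa [pvBfs] using hnd, by simp [pvBfs], by simp, ?_, ?_⟩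
      · intro c hc u hu
        simp only [pvBfs] at hc ⊢
        rcases hInv c hc u hu with h | h
        · exact h
        · simp at h
      · intro x hx
        exact pvReach.base (by simpa [pvBfs] using hx)
  | succ fA ih =>
      intro vis q hnd hA hInv
      cases q with
      | nil =>
          refine ⟨by simpa [pvBfs] using hnd, by simp [pvBfs], by simp, ?_, ?_⟩
          · intro c hc u hu
            simp only [pvBfs] at hc ⊢
            rcases hInv c hc u hu with h | h
            · exact h
            · simp at h
          · intro x hx
            exact pvReach.base (by simpa [pvBfs] using hx)
      | cons c rest =>
          by_cases hc : c ∈ vis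
          · have hstep : pvBfs m (fA+1) vis (c :: rest) = pvBfs m fA vis rest := by
              simp [pvBfs, hc]
            have hInv' : ∀ a ∈ vis, ∀ u ∈ pvAdj m a, u ∈ vis ∨ u ∈ rest := by
              intro a ha u hu
              rcases hInv a ha u hu with h | h
              · exact Or.inl h
              · rcases List.mem_cons.mp h with rfl | h'
                · exact Or.inl hc
                · exact Or.inr h'
            obtain ⟨h1, h2, h3, h4, h5⟩ := ih vis rest hnd (by simp at hA; omega) hInv'
            rw [hstep]
            refine ⟨h1, h2, ?_, h4, ?_⟩
            · intro x hx
              rcases List.mem_cons.mp hx with rfl | h'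
              · exact h2 _ hc
              · exact h3 _ h'
            · intro x hx
              exact pvReach_mono (by intro s hs; simp at hs ⊢; tauto) (h5 x hx)
          · -- new node: A visits c and enqueues its unseen neighbours
            have hbudget := pvBudget_step m vis c hc
            have hstep : pvBfs m (fA+1) vis (c :: rest)
                = pvBfs m fA (vis ++ [c])
                    (rest ++ (pvAdj m c).filter (fun u => decide (u ∉ vis ++ [c]))) := by
              show (if c ∈ vis then _ else _) = _
              rw [if_neg hc, PySem.Set.add_of_not_mem hc, pvFold_eq_filter]
            set vis' := vis ++ [c] with hvis'
            set q' := rest ++ (pvAdj m c).filter (fun u => decide (u ∉ vis')) with hq'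
            have hnd' : vis'.Nodup := by
              rw [hvis']
              simp [List.nodup_append, hnd]
              exact fun a ha he => hc (he ▸ ha)
            have hA' : q'.length + pvBudget m vis' ≤ fA := by
              rw [hq', List.length_append]
              have := List.length_filter_le (fun u => decide (u ∉ vis')) (pvAdj m c)
              simp only [List.length_cons] at hA
              omega
            have hInv' : ∀ a ∈ vis', ∀ u ∈ pvAdj m a, u ∈ vis' ∨ u ∈ q' := by
              intro a ha u hu
              rcases List.mem_append.mp ha with ha' | ha'
              · rcases hInv a ha' u hu with h | h
                · exact Or.inl (List.mem_append_left _ h)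
                · rcases List.mem_cons.mp h with rfl | h'
                  · exact Or.inl (by rw [hvis']; simp)
                  · exact Or.inr (by rw [hq']; exact List.mem_append_left _ h')
              · have hac : a = c := by simpa using ha'
                subst hac
                by_cases hv : u ∈ vis'
                · exact Or.inl hv
                · refine Or.inr ?_
                  rw [hq']
                  refine List.mem_append_right _ (List.mem_filter.mpr ⟨hu, by simpa using hv⟩)
            obtain ⟨h1, h2, h3, h4, h5⟩ := ih vis' q' hnd' hA' hInv'
            rw [hstep]
            refine ⟨h1, ?_, ?_, h4, ?_⟩
            · intro x hx
              exact h2 _ (List.mem_append_left _ hx)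
            · intro x hx
              rcases List.mem_cons.mp hx with rfl | h'
              · exact h2 _ (by rw [hvis']; simp)
              · exact h3 _ (by rw [hq']; exact List.mem_append_left _ h')
            · -- soundness: every base element of vis' ++ q' is reachable from vis ++ c :: rest
              intro x hx
              refine pvReach_bind ?_ (h5 x hx)
              intro s hs
              rcases List.mem_append.mp hs with hs' | hs'
              · rcases List.mem_append.mp hs' with h | h
                · exact pvReach.base (List.mem_append_left _ h)
                · exact pvReach.base (List.mem_append_right _ (by simpa using Or.inl (by simpa using h)))
              · rw [hq'] at hs'
                rcases List.mem_append.mp hs' with h | h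
                · exact pvReach.base (List.mem_append_right _ (List.mem_cons_of_mem _ h))
                · have hadj : s ∈ pvAdj m c := (List.mem_filter.mp h).1
                  exact pvReach.step (pvReach.base (List.mem_append_right _ (List.mem_cons_self))) hadj

-- INNER SWEEP LEMMA for B: properties of the 'for u in ups:' fold
theorem pvInner_main (ups : List Int) : ∀ (v : List Int) (b : Bool),
    v.Nodup →
    ((ups.foldl (fun st2 u => if u ∈ st2.1 then st2 else (PySem.Set.add st2.1 u, true)) (v, b)).1.Nodup)
    ∧ (∀ x ∈ v, x ∈ (ups.foldl (fun st2 u => if u ∈ st2.1 then st2 else (PySem.Set.add st2.1 u, true)) (v, b)).1)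
    ∧ (∀ x ∈ (ups.foldl (fun st2 u => if u ∈ st2.1 then st2 else (PySem.Set.add st2.1 u, true)) (v, b)).1, x ∈ v ∨ x ∈ ups)
    ∧ (b = true → (ups.foldl (fun st2 u => if u ∈ st2.1 then st2 else (PySem.Set.add st2.1 u, true)) (v, b)).2 = true)
    ∧ ((ups.foldl (fun st2 u => if u ∈ st2.1 then st2 else (PySem.Set.add st2.1 u, true)) (v, b)).2 = false →
        (ups.foldl (fun st2 u => if u ∈ st2.1 then st2 else (PySem.Set.add st2.1 u, true)) (v, b)).1 = v ∧ ∀ u ∈ ups, u ∈ v)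
    ∧ (∀ u ∈ ups, u ∈ (ups.foldl (fun st2 u => if u ∈ st2.1 then st2 else (PySem.Set.add st2.1 u, true)) (v, b)).1)
    ∧ ((ups.foldl (fun st2 u => if u ∈ st2.1 then st2 else (PySem.Set.add st2.1 u, true)) (v, b)).2 = true →
        b = true ∨ ∃ x ∈ (ups.foldl (fun st2 u => if u ∈ st2.1 then st2 else (PySem.Set.add st2.1 u, true)) (v, b)).1, x ∉ v) := by
  induction ups with
  | nil =>
      intro v b hnd
      refine ⟨hnd, by simp, by simp, by simp, ?_, by simp, by simp⟩
      intro _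
      exact ⟨rfl, by simp⟩
  | cons u rest ih =>
      intro v b hnd
      rw [List.foldl_cons]
      by_cases hu : u ∈ v
      · rw [if_pos hu]
        obtain ⟨h1, h2, h3, h4, h5, h6, h7⟩ := ih v b hnd
        refine ⟨h1, h2, ?_, h4, ?_, ?_, h7⟩
        · intro x hx
          rcases h3 x hx with h | h
          · exact Or.inl h
          · exact Or.inr (List.mem_cons_of_mem _ h)
        · intro hf
          obtain ⟨he, hall⟩ := h5 hf
          exact ⟨he, by intro w hw; rcases List.mem_cons.mp hw with rfl | hw'; exact hu; exact hall _ hw'⟩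
        · intro w hw
          rcases List.mem_cons.mp hw with rfl | hw'
          · exact h2 _ hu
          · exact h6 _ hw'
      · rw [if_neg hu, PySem.Set.add_of_not_mem hu]
        have hnd' : (v ++ [u]).Nodup := by
          simp [List.nodup_append, hnd]
          exact fun a ha he => hu (he ▸ ha)
        obtain ⟨h1, h2, h3, h4, h5, h6, h7⟩ := ih (v ++ [u]) true hnd'
        have hflag : (rest.foldl (fun st2 u => if u ∈ st2.1 then st2 else (PySem.Set.add st2.1 u, true)) (v ++ [u], true)).2 = true := h4 rfl
        refine ⟨h1, ?_, ?_, fun _ => hflag, ?_, ?_, ?_⟩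
        · intro x hx
          exact h2 _ (List.mem_append_left _ hx)
        · intro x hx
          rcases h3 x hx with h | h
          · rcases List.mem_append.mp h with h' | h'
            · exact Or.inl h'
            · exact Or.inr (by simp at h'; simp [h'])
          · exact Or.inr (List.mem_cons_of_mem _ h)
        · intro hf
          rw [hflag] at hf
          exact absurd hf (by simp)
        · intro w hw
          rcases List.mem_cons.mp hw with rfl | hw'
          · exact h2 _ (List.mem_append_right _ (by simp))
          · exact h6 _ hw'
        · intro _
          exact Or.inr ⟨u, h2 _ (List.mem_append_right _ (by simp)), hu⟩

-- WHOLE-SWEEP LEMMA for B: properties of one 'for sub, ups in upstream_map.items():' sweep,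
-- for any invariant R closed under the pair adjacencies.
theorem pvPass_main (R : Int → Prop) : ∀ (l : List (Int × List Int)) (v : List Int) (b : Bool),
    v.Nodup → (∀ x ∈ v, R x) → (∀ p ∈ l, ∀ u ∈ p.2, R p.1 → R u) →
    ((l.foldl pvPassStep (v, b)).1.Nodup)
    ∧ (∀ x ∈ v, x ∈ (l.foldl pvPassStep (v, b)).1)
    ∧ (∀ x ∈ (l.foldl pvPassStep (v, b)).1, R x)
    ∧ (b = true → (l.foldl pvPassStep (v, b)).2 = true)
    ∧ ((l.foldl pvPassStep (v, b)).2 = false →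
        (l.foldl pvPassStep (v, b)).1 = v ∧ ∀ p ∈ l, p.1 ∈ v → ∀ u ∈ p.2, u ∈ v)
    ∧ ((l.foldl pvPassStep (v, b)).2 = true → b = true ∨ ∃ x ∈ (l.foldl pvPassStep (v, b)).1, x ∉ v)
    ∧ (∀ x ∈ (l.foldl pvPassStep (v, b)).1, x ∈ v ∨ x ∈ l.flatMap Prod.snd) := by
  intro l
  induction l with
  | nil =>
      intro v b hnd hR _
      refine ⟨hnd, by simp, by simpa using hR, by simp, ?_, by simp, by simp⟩
      intro _
      exact ⟨rfl, by simp⟩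
  | cons p tail ih =>
      intro v b hnd hR hstep
      rw [List.foldl_cons]
      have hstep' : ∀ q ∈ tail, ∀ u ∈ q.2, R q.1 → R u :=
        fun q hq => hstep q (List.mem_cons_of_mem _ hq)
      by_cases hp : p.1 ∈ v
      · have hun : pvPassStep (v, b) p
            = p.2.foldl (fun st2 u => if u ∈ st2.1 then st2 else (PySem.Set.add st2.1 u, true)) (v, b) := by
          unfold pvPassStep
          rw [if_pos hp]
        rw [hun]
        obtain ⟨i1, i2, i3, i4, i5, i6, i7⟩ := pvInner_main p.2 v b hnd
        set st1 := p.2.foldl (fun st2 u => if u ∈ st2.1 then st2 else (PySem.Set.add st2.1 u, true)) (v, b) with hst1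
        have hR1 : ∀ x ∈ st1.1, R x := by
          intro x hx
          rcases i3 x hx with h | h
          · exact hR _ h
          · exact hstep p (List.mem_cons_self) x h (hR _ hp)
        have hst1eta : st1 = (st1.1, st1.2) := rfl
        rw [hst1eta]
        obtain ⟨j1, j2, j3, j4, j5, j6, j7⟩ := ih st1.1 st1.2 i1 hR1 hstep'
        refine ⟨j1, ?_, j3, fun hb => j4 (i4 hb), ?_, ?_, ?_⟩
        · intro x hx
          exact j2 _ (i2 _ hx)
        · intro hf
          obtain ⟨he, hcl⟩ := j5 hf
          have hb1 : st1.2 = false := by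
            by_contra hb
            rw [j4 (by simpa using hb)] at hf
            exact absurd hf (by simp)
          obtain ⟨he1, hall⟩ := i5 hb1
          rw [he, he1]
          refine ⟨rfl, ?_⟩
          intro q hq hq1 u hu
          rcases List.mem_cons.mp hq with rfl | hq'
          · exact hall _ hu
          · have := hcl q hq'
            rw [he1] at this
            exact this hq1 u hu
        · intro ht
          rcases j6 ht with hb1 | hex
          · rcases i7 hb1 with hb | hex
            · exact Or.inl hb
            · obtain ⟨x, hx1, hx2⟩ := hex
              exact Or.inr ⟨x, j2 _ hx1, hx2⟩
          · obtain ⟨x, hx1, hx2⟩ := hex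
            refine Or.inr ⟨x, hx1, fun hv => hx2 (i2 _ hv)⟩
        · intro x hx
          rcases j7 x hx with h | h
          · rcases i3 x h with h' | h'
            · exact Or.inl h'
            · exact Or.inr (by simp [List.flatMap_cons]; exact Or.inl h')
          · exact Or.inr (by simp [List.flatMap_cons]; exact Or.inr (by simpa using h))
      · have hun : pvPassStep (v, b) p = (v, b) := by
          unfold pvPassStep
          rw [if_neg hp]
        rw [hun]
        obtain ⟨j1, j2, j3, j4, j5, j6, j7⟩ := ih v b hnd hR hstep'
        refine ⟨j1, j2, j3, j4, ?_, j6, ?_⟩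
        · intro hf
          obtain ⟨he, hcl⟩ := j5 hf
          refine ⟨he, ?_⟩
          intro q hq hq1 u hu
          rcases List.mem_cons.mp hq with rfl | hq'
          · exact absurd hq1 hp
          · exact hcl q hq' hq1 u hu
        · intro x hx
          rcases j7 x hx with h | h
          · exact Or.inl h
          · exact Or.inr (by simp [List.flatMap_cons]; exact Or.inr (by simpa using h))

-- number of graph nodes not yet reached (the fixpoint loop's termination measure)
def pvRem (m : List (Int × List Int)) (vis : List Int) : Nat :=
  ((PySem.List.dedup (m.flatMap Prod.snd)).filter (fun x => decide (x ∉ vis))).length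

-- filtered-count monotonicity and strict decrease when the excluded set grows by a member of U
theorem pvFilter_le (U : List Int) (A B : List Int) (hAB : ∀ y, y ∈ A → y ∈ B) :
    (U.filter (fun y => decide (y ∉ B))).length ≤ (U.filter (fun y => decide (y ∉ A))).length := by
  induction U with
  | nil => simp
  | cons u U' ih =>
      by_cases hb : u ∈ B
      · rw [List.filter_cons_of_neg (by simpa using hb)]
        by_cases ha : u ∈ A
        · rw [List.filter_cons_of_neg (by simpa using ha)]
          exact ih
        · rw [List.filter_cons_of_pos (by simpa using ha)]
          simp only [List.length_cons]
          omega
      · have ha : u ∉ A := fun h => hb (hAB _ h)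
        rw [List.filter_cons_of_pos (by simpa using hb), List.filter_cons_of_pos (by simpa using ha)]
        simpa using ih

theorem pvFilter_lt (U : List Int) (A B : List Int) (hAB : ∀ y, y ∈ A → y ∈ B)
    (x : Int) (hxU : x ∈ U) (hxB : x ∈ B) (hxA : x ∉ A) :
    (U.filter (fun y => decide (y ∉ B))).length < (U.filter (fun y => decide (y ∉ A))).length := by
  induction U with
  | nil => simp at hxU
  | cons u U' ih =>
      by_cases hx : u = x
      · subst hx
        rw [List.filter_cons_of_neg (by simpa using hxB), List.filter_cons_of_pos (by simpa using hxA)]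
        have hle := pvFilter_le U' A B hAB
        simp only [List.length_cons]
        omega
      · have hxU' : x ∈ U' := by
          rcases List.mem_cons.mp hxU with h | h
          · exact absurd h.symm hx
          · exact h
        by_cases hb : u ∈ B
        · rw [List.filter_cons_of_neg (by simpa using hb)]
          by_cases ha : u ∈ A
          · rw [List.filter_cons_of_neg (by simpa using ha)]
            exact ih hxU'
          · rw [List.filter_cons_of_pos (by simpa using ha)]
            have := ih hxU'
            simp only [List.length_cons]
            omega
        · have ha : u ∉ A := fun h => hb (hAB _ h)
          rw [List.filter_cons_of_pos (by simpa using hb), List.filter_cons_of_pos (by simpa using ha)]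
          simpa using ih hxU'

-- FIXPOINT LEMMA for B: with sufficient fuel the sweep loop reaches a fixpoint, whose result is
-- Nodup, contains vis, satisfies R, and is closed under every pair of the map.
theorem pvFix_main (m : List (Int × List Int)) (R : Int → Prop)
    (hstep : ∀ p ∈ m, ∀ u ∈ p.2, R p.1 → R u) :
    ∀ (fuel : Nat) (vis : List Int), vis.Nodup → (∀ x ∈ vis, R x) → pvRem m vis < fuel →
    (pvFix m fuel vis).Nodup
    ∧ (∀ x ∈ vis, x ∈ pvFix m fuel vis)
    ∧ (∀ x ∈ pvFix m fuel vis, R x)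
    ∧ (∀ p ∈ m, p.1 ∈ pvFix m fuel vis → ∀ u ∈ p.2, u ∈ pvFix m fuel vis) := by
  intro fuel
  induction fuel with
  | zero =>
      intro vis _ _ hlt
      omega
  | succ f ih =>
      intro vis hnd hR hlt
      obtain ⟨d1, d2, d3, d4, d5, d6, d7⟩ := pvPass_main R m vis false hnd hR hstep
      have hun : pvFix m (f+1) vis
          = if (m.foldl pvPassStep (vis, false)).2 then pvFix m f (m.foldl pvPassStep (vis, false)).1
            else (m.foldl pvPassStep (vis, false)).1 := rfl
      by_cases hch : (m.foldl pvPassStep (vis, false)).2 = true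
      · rw [hun, if_pos hch]
        set v' := (m.foldl pvPassStep (vis, false)).1 with hv'
        rcases d6 hch with h | hex
        · exact absurd h (by simp)
        obtain ⟨x, hx1, hx2⟩ := hex
        have hxU : x ∈ PySem.List.dedup (m.flatMap Prod.snd) := by
          rcases d7 x hx1 with h | h
          · exact absurd h hx2
          · exact (PySem.List.mem_dedup _ _).mpr h
        have hdec : pvRem m v' < pvRem m vis :=
          pvFilter_lt _ vis v' d2 x hxU hx1 hx2
        obtain ⟨j1, j2, j3, j4⟩ := ih v' d1 d3 (by omega)
        exact ⟨j1, fun y hy => j2 _ (d2 _ hy), j3, j4⟩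
      · rw [hun, if_neg hch]
        obtain ⟨he, hcl⟩ := d5 (by simpa using hch)
        rw [he]
        exact ⟨hnd, fun y hy => hy, hR, hcl⟩

-- with key-distinct pairs, each pair IS its key's adjacency
theorem pvLookup_of_mem : ∀ (m : List (Int × List Int)), (m.map Prod.fst).Nodup →
    ∀ p ∈ m, List.lookup p.1 m = some p.2 := by
  intro m
  induction m with
  | nil => intro _ p hp; simp at hp
  | cons q rest ih =>
      intro hnd p hp
      rcases List.mem_cons.mp hp with rfl | hp'
      · rw [show p = (p.1, p.2) from rfl, List.lookup_cons]
        simp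
      · have hne : p.1 ≠ q.1 := by
          intro he
          have : q.1 ∈ rest.map Prod.fst := by
            rw [← he]
            exact List.mem_map_of_mem hp'
          exact (List.nodup_cons.mp (by simpa using hnd)).1 this
        rw [show q = (q.1, q.2) from rfl, List.lookup_cons]
        have hb : (p.1 == q.1) = false := by simpa using hne
        simp only [hb]
        exact ih (List.nodup_cons.mp (by simpa using hnd)).2 p hp'

theorem pvMem_of_lookup : ∀ (m : List (Int × List Int)) (c : Int) (ups : List Int),
    List.lookup c m = some ups → (c, ups) ∈ m := by
  intro m
  induction m with
  | nil => intro c ups h; simp [List.lookup] at h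
  | cons q rest ih =>
      intro c ups h
      rw [show q = (q.1, q.2) from rfl, List.lookup_cons] at h
      by_cases hb : c = q.1
      · subst hb
        simp at h
        subst h
        exact List.mem_cons_self
      · have hbb : (c == q.1) = false := by simpa using hb
        simp only [hbb] at h
        exact List.mem_cons_of_mem _ (ih c ups h)

-- ===== VERDICT (by name: the statement is the Claim_ definition above) =====
theorem find_all_upstream_spec : Claim_equal_find_all_upstream := by
  intro s m _ hpre
  unfold Spec_find_all_upstream find_all_upstream find_all_upstream_alt
  cases hlk : List.lookup s m with
  | none => rfl
  | some seeds =>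
      simp only []
      set fuel := seeds.length + (m.map (fun p => p.2.length)).sum + 1 with hfuel
      -- A side
      have hbud : pvBudget m [] ≤ (m.map (fun p => p.2.length)).sum := by
        unfold pvBudget
        have he : (PySem.List.dedup (m.map Prod.fst)).filter (fun k => decide (k ∉ ([] : List Int)))
            = PySem.List.dedup (m.map Prod.fst) := List.filter_eq_self.mpr (by simp)
        rw [he]
        exact pvSum_adj_le m _ (PySem.List.nodup_dedup _)
      obtain ⟨a1, a2, a3, a4, a5⟩ := pvBfs_main m fuel [] seeds (by simp) (by omega) (by simp)
      simp only [List.nil_append] at a5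
      set rA := pvBfs m fuel [] seeds with hrA
      -- B side
      have hstep : ∀ p ∈ m, ∀ u ∈ p.2, pvReach m seeds p.1 → pvReach m seeds u := by
        intro p hp u hu hr
        have hadj : pvAdj m p.1 = p.2 := by
          unfold pvAdj
          rw [pvLookup_of_mem m hpre p hp]
          rfl
        exact pvReach.step hr (by rw [hadj]; exact hu)
      have hrem : pvRem m (PySem.Set.ofList seeds) < fuel := by
        have h1 : pvRem m (PySem.Set.ofList seeds)
            ≤ (PySem.List.dedup (m.flatMap Prod.snd)).length := List.length_filter_le _ _
        have h2 : (PySem.List.dedup (m.flatMap Prod.snd)).length ≤ (m.flatMap Prod.snd).length := by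
          rw [PySem.List.dedup_eq_ofList]
          exact PySem.Set.length_ofList_le _
        have h3 : (m.flatMap Prod.snd).length = (m.map (fun p => p.2.length)).sum := by
          simp [List.length_flatMap]
        omega
      obtain ⟨b1, b2, b3, b4⟩ := pvFix_main m (pvReach m seeds) hstep fuel (PySem.Set.ofList seeds)
        (PySem.Set.nodup_ofList _)
        (fun x hx => pvReach.base ((PySem.Set.mem_ofList _ _).mp hx))
        hrem
      set rB := pvFix m fuel (PySem.Set.ofList seeds) with hrB
      -- membership equivalence
      have hseedsB : ∀ x ∈ seeds, x ∈ rB := fun x hx => b2 _ ((PySem.Set.mem_ofList _ _).mpr hx)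
      have hclB : ∀ c ∈ rB, ∀ u ∈ pvAdj m c, u ∈ rB := by
        intro c hc u hu
        unfold pvAdj at hu
        cases hl : List.lookup c m with
        | none => rw [hl] at hu; simp at hu
        | some ups =>
            rw [hl] at hu
            simp at hu
            exact b4 (c, ups) (pvMem_of_lookup m c ups hl) hc u hu
      have hAB : ∀ x, x ∈ rA ↔ x ∈ rB := by
        intro x
        constructor
        · intro hx
          exact pvReach_closed hseedsB hclB (a5 x hx)
        · intro hx
          exact pvReach_closed a3 a4 (b3 x hx)
      have hperm : rA.Perm rB := (List.perm_ext_iff_of_nodup a1 b1).mpr hAB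
      exact PySem.List.sorted_eq_sorted_of_perm rA rB (fun x => x) (fun a b h => h) hperm
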